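-- pv_equiv track=rewrite | github.com/moe10k/Cipher-Decryptor-Tool | beaufort-decryptor/beaufort.py | beaufort_decrypt
-- ===== SOURCE A (Python) =====
-- def beaufort_decrypt(ciphertext, key):
--     plaintext = ''
--     key = key.upper()
--     key_index = 0
--
--     for char in ciphertext:
--         if char.isalpha():
--             key_char = key[key_index % len(key)]
--             shift = ord(key_char) - ord('A')
--             if char.isupper():
--                 c_val = ord(char) - ord('A')
--                 p_val = (shift - c_val + 26) % 26
--                 decrypted_char = chr(p_val + ord('A'))
--             else:
--                 c_val = ord(char) - ord('a')
--                 p_val = (shift - c_val + 26) % 26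
--                 decrypted_char = chr(p_val + ord('a'))
--             plaintext += decrypted_char
--             key_index += 1
--         else:
--             plaintext += char
--     return plaintext
-- ===== SOURCE B (Python) =====
-- def beaufort_decrypt(ciphertext, key):
--     # pass 1: collect the letters and decrypt them against the key stream
--     key = key.upper()
--     letters = [c for c in ciphertext if c.isalpha()]
--     decrypted = []
--     for i, c in enumerate(letters):
--         shift = ord(key[i % len(key)]) - ord('A')
--         base = ord('A') if c.isupper() else ord('a')
--         decrypted.append(chr((shift - (ord(c) - base) + 26) % 26 + base))
--     # pass 2: merge decrypted letters back over the non-letter skeleton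
--     it = iter(decrypted)
--     return ''.join(next(it) if c.isalpha() else c for c in ciphertext)
-- ===== Notes on version B (the rewrite author's own statement) =====
-- stated objective: alternative
-- what changed: A threads one loop with an explicit key_index and string concatenation; B is a filter->map->merge pipeline: it first extracts the letters and decrypts them via enumerate over the key stream, then a second pass re-merges them with the non-letter characters.
import Mathlib
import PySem

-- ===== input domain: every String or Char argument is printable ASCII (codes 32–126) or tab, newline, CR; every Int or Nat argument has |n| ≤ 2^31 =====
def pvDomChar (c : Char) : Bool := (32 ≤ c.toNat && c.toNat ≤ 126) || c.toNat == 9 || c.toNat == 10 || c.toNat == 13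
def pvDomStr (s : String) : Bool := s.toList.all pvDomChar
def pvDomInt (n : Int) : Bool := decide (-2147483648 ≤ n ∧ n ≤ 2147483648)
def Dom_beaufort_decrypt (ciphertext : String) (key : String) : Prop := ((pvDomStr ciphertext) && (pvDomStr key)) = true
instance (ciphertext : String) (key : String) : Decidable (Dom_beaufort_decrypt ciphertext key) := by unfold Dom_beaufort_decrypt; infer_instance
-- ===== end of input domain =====

-- B replaces A's single index-threaded loop by a filter->map->merge pipeline
-- (decrypt the letters first, then merge them back over the non-letters); alternative, not faster.


-- shared per-letter arithmetic (identical formula in both Pythons):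
-- key_char = key[ki % len(key)]; shift = ord(key_char)-ord('A'); (shift - c_val + 26) % 26 on the right base
def bdDecChar (keyU : List Char) (ki : Int) (c : Char) : Char :=
  let keyChar := keyU.getD (PySem.Int.mod ki (Int.ofNat keyU.length)).toNat 'A'
  let shift : Int := Int.ofNat keyChar.toNat - 65
  if PySem.Chars.isupper c then
    Char.ofNat ((PySem.Int.mod (shift - (Int.ofNat c.toNat - 65) + 26) 26).toNat + 65)
  else
    Char.ofNat ((PySem.Int.mod (shift - (Int.ofNat c.toNat - 97) + 26) 26).toNat + 97)

-- ===== PORT A =====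
-- A's loop: one pass over the ciphertext, threading key_index, consing the output
def bdLoopA (keyU : List Char) : List Char → Int → List Char
  | [], _ => []
  | c :: rest, ki =>
    if PySem.Chars.isalpha c then
      bdDecChar keyU ki c :: bdLoopA keyU rest (ki + 1)
    else
      c :: bdLoopA keyU rest ki

def beaufort_decrypt (ciphertext : String) (key : String) : String :=
  String.ofList (bdLoopA (PySem.Str.upper key).toList ciphertext.toList 0)

-- ===== PORT B =====
-- B pass 2: emit non-letters as-is, pull the next precomputed decrypted letter otherwise
-- (the decrypted list is never exhausted when it was built from this ciphertext's letters;
--  the [] branch mirrors the unreachable exhausted-iterator case)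
def bdMerge : List Char → List Char → List Char
  | [], _ => []
  | c :: rest, ds =>
    if PySem.Chars.isalpha c then
      match ds with
      | d :: ds' => d :: bdMerge rest ds'
      | [] => []
    else
      c :: bdMerge rest ds

def beaufort_decrypt_alt (ciphertext : String) (key : String) : String :=
  let keyU := (PySem.Str.upper key).toList
  let letters := ciphertext.toList.filter PySem.Chars.isalpha
  let decrypted := (PySem.List.enumerate letters).map (fun p => bdDecChar keyU p.1 p.2)
  String.ofList (bdMerge ciphertext.toList decrypted)

-- ===== PRECONDITION & SPEC =====
-- Pre_ excludes exactly the inputs where Python A raises ZeroDivisionError: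
-- an empty key together with at least one alphabetic character in the ciphertext.
def Pre_beaufort_decrypt (ciphertext : String) (key : String) : Prop :=
  key ≠ "" ∨ ciphertext.toList.all (fun c => !PySem.Chars.isalpha c) = true
instance (ciphertext : String) (key : String) : Decidable (Pre_beaufort_decrypt ciphertext key) := by unfold Pre_beaufort_decrypt; infer_instance
def pvWitness_beaufort_decrypt : String × String := ("Ab, cD!", "Key")
def Spec_beaufort_decrypt (ciphertext : String) (key : String) (out : String) : Prop := out = beaufort_decrypt_alt ciphertext key
instance (ciphertext : String) (key : String) (out : String) : Decidable (Spec_beaufort_decrypt ciphertext key out) := by unfold Spec_beaufort_decrypt; infer_instance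

-- ===== CLAIM (what is proved, stated in full; the proofs are below) =====
def Claim_equal_beaufort_decrypt : Prop := ∀ (ciphertext : String) (key : String), Dom_beaufort_decrypt ciphertext key → Pre_beaufort_decrypt ciphertext key → Spec_beaufort_decrypt ciphertext key (beaufort_decrypt ciphertext key)

-- ===== LEMMAS AND PROOFS =====

-- merging the decrypted letter stream back equals A's fused loop, for any start index
theorem bdMerge_eq_loopA (keyU : List Char) (cs : List Char) (ki : Int) :
    bdMerge cs ((PySem.List.enumerate (cs.filter PySem.Chars.isalpha) ki).map (fun p => bdDecChar keyU p.1 p.2))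
      = bdLoopA keyU cs ki := by
  induction cs generalizing ki with
  | nil => simp [bdMerge, bdLoopA]
  | cons c rest ih =>
    by_cases h : PySem.Chars.isalpha c
    · simp [bdMerge, bdLoopA, h, PySem.List.enumerate_cons, ih]
    · simp [bdMerge, bdLoopA, h, ih]

-- ===== VERDICT (by name: the statement is the Claim_ definition above) =====
theorem beaufort_decrypt_spec : Claim_equal_beaufort_decrypt := by
  intro ciphertext key _ _
  exact congrArg String.ofList (bdMerge_eq_loopA (PySem.Str.upper key).toList ciphertext.toList 0).symm
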